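-- pv_equiv track=rewrite | github.com/chdb-io/chdb | connection.py | _is_aggregate_query
-- ===== SOURCE A (Python) =====
-- def _is_aggregate_query(sql_upper: str) -> bool:
--     """
--     Check if the query is an aggregate query (has aggregate functions but no GROUP BY).
--
--     Aggregate queries return a single row or reduced result set,
--     so row order preservation doesn't make sense.
--     """
--     # Common aggregate functions
--     aggregate_functions = [
--         'COUNT(',
--         'SUM(',
--         'AVG(',
--         'MIN(',
--         'MAX(',
--         'STDDEV(',
--         'STDDEVPOP(',
--         'STDDEVSAMP(',
--         'VAR(',
--         'VARPOP(',
--         'VARSAMP(',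
--         'CORR(',
--         'COVAR_POP(',
--         'COVAR_SAMP(',
--         'ANY(',
--         'ANYIF(',
--         'UNIQ(',
--         'UNIQEXACT(',
--         'QUANTILE(',
--         'QUANTILES(',
--         'MEDIAN(',
--         'MEDIANEXACT(',
--     ]
--
--     # Check if any aggregate function is present
--     has_aggregate = any(func in sql_upper for func in aggregate_functions)
--
--     # It's an aggregate query if it has aggregate functions but no GROUP BY
--     # (GROUP BY is already handled separately)
--     return has_aggregate
-- ===== SOURCE B (Python) =====
-- # First-character dispatch: group the aggregate tokens by their initial letter,
-- # then make one left-to-right pass; at each position look up the bucket for the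
-- # current character and only test those tokens.
-- _BY_FIRST = {
--     'A': ('ANY(', 'ANYIF(', 'AVG('),
--     'C': ('COUNT(', 'CORR(', 'COVAR_POP(', 'COVAR_SAMP('),
--     'M': ('MIN(', 'MAX(', 'MEDIAN(', 'MEDIANEXACT('),
--     'Q': ('QUANTILE(', 'QUANTILES('),
--     'S': ('SUM(', 'STDDEV(', 'STDDEVPOP(', 'STDDEVSAMP('),
--     'U': ('UNIQ(', 'UNIQEXACT('),
--     'V': ('VAR(', 'VARPOP(', 'VARSAMP('),
-- }
--
--
-- def _is_aggregate_query(sql_upper: str) -> bool: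
--     for i, ch in enumerate(sql_upper):
--         toks = _BY_FIRST.get(ch)
--         if toks and sql_upper.startswith(toks, i):
--             return True
--     return False
-- ===== Notes on version B (the rewrite author's own statement) =====
-- stated objective: alternative
-- what changed: A runs 22 independent substring containment scans over the whole string; B makes one left-to-right pass with the tokens bucketed by first letter in a dict, testing at each position only the bucket selected by the current character.
import Mathlib
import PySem

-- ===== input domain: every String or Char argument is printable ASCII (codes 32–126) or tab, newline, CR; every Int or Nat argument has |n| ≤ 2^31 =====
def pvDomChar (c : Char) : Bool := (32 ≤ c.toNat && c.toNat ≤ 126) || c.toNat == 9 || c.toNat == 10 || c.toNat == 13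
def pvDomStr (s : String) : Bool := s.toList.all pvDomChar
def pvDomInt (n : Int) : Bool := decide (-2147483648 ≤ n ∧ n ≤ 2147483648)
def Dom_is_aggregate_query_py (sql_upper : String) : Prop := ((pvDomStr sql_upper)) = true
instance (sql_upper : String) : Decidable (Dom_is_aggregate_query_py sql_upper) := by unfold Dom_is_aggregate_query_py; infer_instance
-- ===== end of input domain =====

-- B replaces A's 22 whole-string containment scans by one left-to-right pass with the tokens bucketed by first letter; objective: alternative.

-- ===== PORT A =====
def pvAggFunctions : List String :=
  ["COUNT(", "SUM(", "AVG(", "MIN(", "MAX(", "STDDEV(", "STDDEVPOP(",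
   "STDDEVSAMP(", "VAR(", "VARPOP(", "VARSAMP(", "CORR(", "COVAR_POP(",
   "COVAR_SAMP(", "ANY(", "ANYIF(", "UNIQ(", "UNIQEXACT(", "QUANTILE(",
   "QUANTILES(", "MEDIAN(", "MEDIANEXACT("]

def is_aggregate_query_py (sql_upper : String) : Bool :=
  pvAggFunctions.any (fun func => PySem.Str.isIn func sql_upper)

-- ===== PORT B =====
-- Source B's _BY_FIRST dict: tokens bucketed by their first letter ('.get' of a missing key = [])
def pvByFirst (c : Char) : List (List Char) :=
  if c = 'A' then ["ANY(", "ANYIF(", "AVG("].map String.toList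
  else if c = 'C' then ["COUNT(", "CORR(", "COVAR_POP(", "COVAR_SAMP("].map String.toList
  else if c = 'M' then ["MIN(", "MAX(", "MEDIAN(", "MEDIANEXACT("].map String.toList
  else if c = 'Q' then ["QUANTILE(", "QUANTILES("].map String.toList
  else if c = 'S' then ["SUM(", "STDDEV(", "STDDEVPOP(", "STDDEVSAMP("].map String.toList
  else if c = 'U' then ["UNIQ(", "UNIQEXACT("].map String.toList
  else if c = 'V' then ["VAR(", "VARPOP(", "VARSAMP("].map String.toList
  else []

-- the pass over positions: bucket lookup, then startswith over that bucket only
def pvScanB : List Char → Bool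
  | [] => false
  | c :: rest => (pvByFirst c).any (fun t => t.isPrefixOf (c :: rest)) || pvScanB rest

def is_aggregate_query_py_alt (sql_upper : String) : Bool :=
  pvScanB sql_upper.toList

-- ===== PRECONDITION & SPEC =====
def Spec_is_aggregate_query_py (sql_upper : String) (out : Bool) : Prop := out = is_aggregate_query_py_alt sql_upper
instance (sql_upper : String) (out : Bool) : Decidable (Spec_is_aggregate_query_py sql_upper out) := by unfold Spec_is_aggregate_query_py; infer_instance

-- ===== CLAIM (what is proved, stated in full; the proofs are below) =====
def Claim_equal_is_aggregate_query_py : Prop := ∀ (sql_upper : String), Dom_is_aggregate_query_py sql_upper → Spec_is_aggregate_query_py sql_upper (is_aggregate_query_py sql_upper)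

-- ===== LEMMAS AND PROOFS =====

-- A's token list as character lists (proof-side only)
def pvAggTokens : List (List Char) := pvAggFunctions.map String.toList

-- every bucket holds only tokens from A's list
lemma pvByFirst_subset : ∀ (c : Char), ∀ t ∈ pvByFirst c, t ∈ pvAggTokens := by
  intro c
  unfold pvByFirst
  split_ifs <;> decide

-- every token of A's list is nonempty and lives in the bucket of its first letter
lemma pvAggTokens_bucket :
    ∀ t ∈ pvAggTokens, t ≠ [] ∧ t ∈ pvByFirst (t.headD ' ') := by decide

-- the bucketed prefix test at a position equals the full-list prefix test there
lemma pvByFirst_any (c : Char) (rest : List Char) :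
    (pvByFirst c).any (fun t => t.isPrefixOf (c :: rest)) =
      pvAggTokens.any (fun t => t.isPrefixOf (c :: rest)) := by
  rcases h : pvAggTokens.any (fun t => t.isPrefixOf (c :: rest)) with _ | _
  · rw [Bool.eq_false_iff]
    intro hc
    rw [Bool.eq_false_iff] at h
    apply h
    rw [List.any_eq_true] at hc ⊢
    rcases hc with ⟨t, ht, hp⟩
    exact ⟨t, pvByFirst_subset c t ht, hp⟩
  · rw [List.any_eq_true] at h ⊢
    rcases h with ⟨t, ht, hp⟩
    refine ⟨t, ?_, hp⟩
    have hb := (pvAggTokens_bucket t ht).2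
    cases t with
    | nil => exact absurd rfl (pvAggTokens_bucket [] ht).1
    | cons h' tl =>
      have : h' = c := by
        have := List.isPrefixOf_iff_prefix.mp hp
        rcases this with ⟨s, hs⟩
        cases hs
        rfl
      simpa [this] using hb
  
-- B's scan finds a token iff some token of A's list is an infix
lemma pvScanB_iff (cs : List Char) :
    pvScanB cs = true ↔ ∃ t ∈ pvAggTokens, t <:+: cs := by
  induction cs with
  | nil =>
    simp only [pvScanB]
    constructor
    · intro h; cases h
    · rintro ⟨t, ht, hinf⟩
      exact absurd (List.eq_nil_of_infix_nil hinf) (pvAggTokens_bucket t ht).1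
  | cons c rest ih =>
    simp only [pvScanB, Bool.or_eq_true, pvByFirst_any, List.any_eq_true, ih]
    constructor
    · rintro (⟨t, ht, hp⟩ | ⟨t, ht, hi⟩)
      · exact ⟨t, ht, (List.isPrefixOf_iff_prefix.mp hp).isInfix⟩
      · exact ⟨t, ht, List.infix_cons hi⟩
    · rintro ⟨t, ht, hi⟩
      rcases List.infix_cons_iff.mp hi with hp | hi'
      · exact Or.inl ⟨t, ht, List.isPrefixOf_iff_prefix.mpr hp⟩
      · exact Or.inr ⟨t, ht, hi'⟩

-- ===== VERDICT (by name: the statement is the Claim_ definition above) =====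
theorem is_aggregate_query_py_spec : Claim_equal_is_aggregate_query_py := by
  intro s _
  unfold Spec_is_aggregate_query_py
  unfold is_aggregate_query_py is_aggregate_query_py_alt
  rcases h : pvScanB s.toList with _ | _
  · rw [Bool.eq_false_iff] at h ⊢
    intro hc
    apply h
    rw [List.any_eq_true] at hc
    rcases hc with ⟨f, hf, hin⟩
    rw [pvScanB_iff]
    exact ⟨f.toList, List.mem_map_of_mem hf, (PySem.Str.isIn_iff_infix f s).mp hin⟩
  · rw [pvScanB_iff] at h
    rcases h with ⟨t, ht, hinf⟩
    rw [List.any_eq_true]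
    rcases List.mem_map.mp ht with ⟨f, hf, rfl⟩
    exact ⟨f, hf, (PySem.Str.isIn_iff_infix f s).mpr hinf⟩
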